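-- pv_equiv track=rewrite | github.com/Goodman-lab/CONFPASS | BinsTest_rmsCheck.py | put_list2cluster
-- ===== SOURCE A (Python) =====
-- def put_item2list(cluster_ls,new_item):
--
--     new_cluster_ls=cluster_ls
--     new_TF=[]
--
--     for i in new_cluster_ls:
--         if new_item[0] not in i and new_item[1] not in i:
--             new_TF.append('F')
--
--         elif new_item[0] in i and new_item[1] not in i:
--             new_TF.append('T1')
--
--         elif new_item[0] not in i and new_item[1]  in i:
--             new_TF.append('T0')
--
--         elif new_item[0] in i and new_item[1] in i:
--             new_TF.append('T')
--
--
--     if 'T1' in new_TF: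
--         append_idx=new_TF.index('T1')
--         new_cluster_ls[append_idx].append(new_item[1])
--
--     elif 'T0' in new_TF:
--         append_idx=new_TF.index('T0')
--         new_cluster_ls[append_idx].append(new_item[0])
--
--     elif 'T' in new_TF:
--         pass
--
--     else:
--         new_cluster_ls.append(new_item)
--
--     return new_cluster_ls
--
-- def put_list2cluster(repeat_ls):
--
--     ## resort the conformers into bins according to the rms calculation result
--
--     select_idx=[list(i[0]) for i in repeat_ls]
--
--     new_cluster_ls=[]
--     try:
--         new_cluster_ls=[select_idx[0]]
--
--     except IndexError:
--         pass
--
--     for i in select_idx[1:]: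
--         put_item2list(new_cluster_ls,i)
--
--     return  new_cluster_ls
-- ===== SOURCE B (Python) =====
-- def put_list2cluster(repeat_ls):
--     # B: one pass with an element -> {containing cluster indices} index; the first
--     # T1/T0 cluster is the minimal index in a set difference, so no rescan of clusters.
--     select_idx = [list(i[0]) for i in repeat_ls]
--     if not select_idx:
--         return []
--     clusters = [select_idx[0]]
--     where = {}
--     for x in select_idx[0]:
--         where.setdefault(x, set()).add(0)
--     for item in select_idx[1:]:
--         a, b = item[0], item[1]
--         ia = where.get(a, set())
--         ib = where.get(b, set())
--         t1 = ia - ib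
--         t0 = ib - ia
--         if t1:
--             j = min(t1)
--             clusters[j].append(b)
--             where.setdefault(b, set()).add(j)
--         elif t0:
--             j = min(t0)
--             clusters[j].append(a)
--             where.setdefault(a, set()).add(j)
--         elif ia & ib:
--             pass
--         else:
--             j = len(clusters)
--             clusters.append(item)
--             for x in item:
--                 where.setdefault(x, set()).add(j)
--     return clusters
-- ===== Notes on version B (the rewrite author's own statement) =====
-- stated objective: faster
-- what changed: B replaces A's per-item rescan of every cluster (building the T1/T0/T/F label list and re-scanning it with 'in' and .index) by a dictionary mapping each element to the set of cluster indices containing it; the first T1/T0 cluster is the minimum of a set difference, so each item is processed via O(item-size) dictionary lookups instead of a pass over all clusters.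
import Mathlib
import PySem

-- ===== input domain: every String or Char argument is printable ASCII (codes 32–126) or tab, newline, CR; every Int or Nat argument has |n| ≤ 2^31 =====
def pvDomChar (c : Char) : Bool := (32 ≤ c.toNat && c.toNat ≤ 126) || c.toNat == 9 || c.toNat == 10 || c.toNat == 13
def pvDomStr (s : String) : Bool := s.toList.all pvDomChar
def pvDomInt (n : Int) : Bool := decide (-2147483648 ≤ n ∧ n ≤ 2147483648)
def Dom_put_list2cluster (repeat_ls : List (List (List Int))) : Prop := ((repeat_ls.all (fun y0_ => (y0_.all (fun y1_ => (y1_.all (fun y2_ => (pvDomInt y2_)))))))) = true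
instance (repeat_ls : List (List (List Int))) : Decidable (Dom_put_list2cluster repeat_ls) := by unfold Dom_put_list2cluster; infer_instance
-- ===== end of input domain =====

-- B replaces A's per-item rescan of all clusters with an element → {containing cluster
-- indices} dictionary; the first T1/T0 cluster becomes the minimum of a set difference
-- (objective: faster, near-linear instead of quadratic in the number of clusters).
-- Note: Python A mutates the lists it builds internally but never the caller's argument
-- (list(i[0]) copies), so return-value equivalence is the whole story.

-- ===== PORT A =====
-- classification of one cluster against the item's first two entries (the four-way elif chain)
def pvTF (a b : Int) (i : List Int) : String :=
  if ¬ i.contains a ∧ ¬ i.contains b then "F"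
  else if i.contains a ∧ ¬ i.contains b then "T1"
  else if ¬ i.contains a ∧ i.contains b then "T0"
  else "T"

def put_item2list (cluster_ls : List (List Int)) (new_item : List Int) : List (List Int) :=
  let a := (PySem.List.pyGet? new_item 0).getD 0   -- new_item[0]; Pre_ guarantees it exists
  let b := (PySem.List.pyGet? new_item 1).getD 0   -- new_item[1]
  let new_TF := cluster_ls.map (pvTF a b)
  if new_TF.contains "T1" then
    let append_idx := (PySem.List.index? new_TF "T1").getD 0
    cluster_ls.modify append_idx (fun c => c ++ [b])
  else if new_TF.contains "T0" then
    let append_idx := (PySem.List.index? new_TF "T0").getD 0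
    cluster_ls.modify append_idx (fun c => c ++ [a])
  else if new_TF.contains "T" then cluster_ls
  else cluster_ls ++ [new_item]

def put_list2cluster (repeat_ls : List (List (List Int))) : List (List Int) :=
  let select_idx := repeat_ls.map (fun i => (PySem.List.pyGet? i 0).getD [])  -- list(i[0]); Pre_ guarantees i ≠ []
  match select_idx with
  | [] => []                                         -- the except IndexError: pass branch
  | first :: rest => rest.foldl put_item2list [first]

-- ===== PORT B =====
-- where.setdefault(x, set()).add(j)
def pvWhereAdd (w : PySem.Dict Int (PySem.Set Nat)) (x : Int) (j : Nat) : PySem.Dict Int (PySem.Set Nat) :=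
  w.modify x [] (fun s => PySem.Set.add s j)

-- the for x in item loop registering a fresh cluster index
def pvAddAll (w : PySem.Dict Int (PySem.Set Nat)) (xs : List Int) (j : Nat) : PySem.Dict Int (PySem.Set Nat) :=
  xs.foldl (fun w x => pvWhereAdd w x j) w

-- one iteration of B's main loop over (clusters, where)
def pvStep (st : List (List Int) × PySem.Dict Int (PySem.Set Nat)) (item : List Int) :
    List (List Int) × PySem.Dict Int (PySem.Set Nat) :=
  let clusters := st.1
  let w := st.2
  let a := (PySem.List.pyGet? item 0).getD 0
  let b := (PySem.List.pyGet? item 1).getD 0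
  let ia := w.getD a []
  let ib := w.getD b []
  let t1 := PySem.Set.diff ia ib
  let t0 := PySem.Set.diff ib ia
  if t1 ≠ [] then
    let j := (PySem.List.min? t1 (fun x => x)).getD 0
    (clusters.modify j (fun c => c ++ [b]), pvWhereAdd w b j)
  else if t0 ≠ [] then
    let j := (PySem.List.min? t0 (fun x => x)).getD 0
    (clusters.modify j (fun c => c ++ [a]), pvWhereAdd w a j)
  else if PySem.Set.inter ia ib ≠ [] then (clusters, w)
  else (clusters ++ [item], pvAddAll w item clusters.length)

def put_list2cluster_alt (repeat_ls : List (List (List Int))) : List (List Int) :=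
  let select_idx := repeat_ls.map (fun i => (PySem.List.pyGet? i 0).getD [])
  match select_idx with
  | [] => []
  | first :: rest =>
    (rest.foldl pvStep ([first], pvAddAll PySem.Dict.empty first 0)).1

-- ===== PRECONDITION & SPEC =====
-- Pre_ excludes exactly the inputs where Python A raises IndexError: an empty inner list
-- (i[0] in the comprehension) or an item after the first with fewer than two conformer
-- indices in its first sublist (new_item[1]).  B raises there too.
def Pre_put_list2cluster (repeat_ls : List (List (List Int))) : Prop :=
  (∀ i ∈ repeat_ls, i ≠ []) ∧ (∀ i ∈ repeat_ls.drop 1, 2 ≤ (i.headD []).length)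
instance (repeat_ls : List (List (List Int))) : Decidable (Pre_put_list2cluster repeat_ls) := by
  unfold Pre_put_list2cluster; infer_instance

def pvWitness_put_list2cluster : List (List (List Int)) := [[[1, 2]], [[2, 3], [9]], [[4, 5]]]

def Spec_put_list2cluster (repeat_ls : List (List (List Int))) (out : List (List Int)) : Prop := out = put_list2cluster_alt repeat_ls
instance (repeat_ls : List (List (List Int))) (out : List (List Int)) : Decidable (Spec_put_list2cluster repeat_ls out) := by unfold Spec_put_list2cluster; infer_instance

-- ===== CLAIM (what is proved, stated in full; the proofs are below) =====
def Claim_equal_put_list2cluster : Prop := ∀ (repeat_ls : List (List (List Int))), Dom_put_list2cluster repeat_ls → Pre_put_list2cluster repeat_ls → Spec_put_list2cluster repeat_ls (put_list2cluster repeat_ls)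

-- ===== LEMMAS AND PROOFS =====

-- the coupling invariant: w.getD x [] holds exactly the indices of clusters containing x
def pvInv (clusters : List (List Int)) (w : PySem.Dict Int (PySem.Set Nat)) : Prop :=
  ∀ (x : Int) (j : Nat), j ∈ w.getD x [] ↔ j < clusters.length ∧ x ∈ clusters.getD j []

theorem pvWhereAdd_getD (w : PySem.Dict Int (PySem.Set Nat)) (y : Int) (j : Nat) (x : Int) :
    (pvWhereAdd w y j).getD x [] = if x = y then PySem.Set.add (w.getD y []) j else w.getD x [] := by
  simp [pvWhereAdd, PySem.Dict.getD_modify]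

theorem pvWhereAdd_mem (w : PySem.Dict Int (PySem.Set Nat)) (y : Int) (j : Nat) (x : Int) (k : Nat) :
    k ∈ (pvWhereAdd w y j).getD x [] ↔ k ∈ w.getD x [] ∨ (k = j ∧ x = y) := by
  rw [pvWhereAdd_getD]
  by_cases h : x = y <;> simp [h, PySem.Set.mem_add] <;> tauto

theorem pvAddAll_mem (xs : List Int) (w : PySem.Dict Int (PySem.Set Nat)) (j : Nat) (x : Int) (k : Nat) :
    k ∈ (pvAddAll w xs j).getD x [] ↔ k ∈ w.getD x [] ∨ (k = j ∧ x ∈ xs) := by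
  induction xs generalizing w with
  | nil => simp [pvAddAll]
  | cons y ys ih =>
    simp only [pvAddAll, List.foldl_cons] at *
    rw [ih, pvWhereAdd_mem]
    simp only [List.mem_cons]
    tauto

theorem pvTF_eq_T1 (a b : Int) (i : List Int) : pvTF a b i = "T1" ↔ a ∈ i ∧ b ∉ i := by
  unfold pvTF
  by_cases ha : i.contains a <;> by_cases hb : i.contains b <;>
    simp_all [List.contains_iff_mem]

theorem pvTF_eq_T0 (a b : Int) (i : List Int) : pvTF a b i = "T0" ↔ a ∉ i ∧ b ∈ i := by
  unfold pvTF
  by_cases ha : i.contains a <;> by_cases hb : i.contains b <;>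
    simp_all [List.contains_iff_mem]

theorem pvTF_eq_T (a b : Int) (i : List Int) : pvTF a b i = "T" ↔ a ∈ i ∧ b ∈ i := by
  unfold pvTF
  by_cases ha : i.contains a <;> by_cases hb : i.contains b <;>
    simp_all [List.contains_iff_mem]

-- contains "T1" on the mapped list ↔ the difference set is nonempty (and likewise T0, T)
theorem pv_contains_iff_exists (s : String) (a b : Int) (clusters : List (List Int)) :
    (clusters.map (pvTF a b)).contains s = true ↔ ∃ c ∈ clusters, pvTF a b c = s := by
  simp [List.contains_iff_mem]

-- least index characterisations agree: index? of the mapped list = min? of the set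
theorem pv_index?_map_eq_min? (clusters : List (List Int)) (f : List Int → String)
    (S : List Nat) (t : String)
    (hmem : ∀ j, j ∈ S ↔ ∃ h : j < clusters.length, f clusters[j] = t)
    (hS : S ≠ []) :
    (PySem.List.index? (clusters.map f) t).getD 0 = ((PySem.List.min? S (fun x => x)).getD 0 : Nat) := by
  -- both sides are the least j with f clusters[j] = t
  obtain ⟨j0, hj0⟩ := List.exists_mem_of_ne_nil S hS
  have hcontains : t ∈ clusters.map f := by
    obtain ⟨h, hf⟩ := (hmem j0).1 hj0
    exact List.mem_map.2 ⟨clusters[j0], List.getElem_mem h, hf⟩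
  obtain ⟨k, hk⟩ := Option.isSome_iff_exists.1 ((PySem.List.index?_isSome_iff _ _).2 hcontains)
  obtain ⟨hklen, hkval, hkmin⟩ := PySem.List.getElem_of_index?_eq_some hk
  obtain ⟨m, hm⟩ : ∃ m, PySem.List.min? S (fun x => x) = some m := by
    cases hmin : PySem.List.min? S (fun x => x) with
    | none => exact absurd ((PySem.List.min?_eq_none_iff S (fun x => x)).1 hmin) hS
    | some m => exact ⟨m, rfl⟩
  have hmS := PySem.List.min?_mem hm
  have hmle := PySem.List.min?_isMin hm
  rw [hk, hm]
  simp only [Option.getD_some]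
  -- k ∈ S
  have hklt : k < clusters.length := by simpa using hklen
  have hkS : k ∈ S := (hmem k).2 ⟨hklt, by simpa [List.getElem_map] using hkval⟩
  -- m satisfies the predicate, so k ≤ m by minimality of index?
  obtain ⟨hmlt, hmP⟩ := (hmem m).1 hmS
  have hkm : k ≤ m := by
    by_contra hlt
    push_neg at hlt
    exact hkmin m (by simpa using hlt) (by simp [List.getElem_map, hmP])
  have hmk : m ≤ k := hmle k hkS
  omega

theorem pv_getD_modify_append (clusters : List (List Int)) (j : Nat) (v : Int) (k : Nat) :
    (clusters.modify j (fun c => c ++ [v])).getD k [] =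
      if k = j ∧ k < clusters.length then clusters.getD k [] ++ [v] else clusters.getD k [] := by
  simp only [List.getD, List.getElem?_modify]
  by_cases hk : k < clusters.length
  · rw [List.getElem?_eq_getElem hk]
    by_cases hkj : j = k
    · subst hkj; simp [hk]
    · have hne : ¬ (k = j) := fun h => hkj h.symm
      simp [hkj, hne]
  · rw [List.getElem?_eq_none (by omega)]
    simp [hk]

theorem pv_getD_append (clusters : List (List Int)) (item : List Int) (k : Nat) :
    (clusters ++ [item]).getD k [] =
      if k < clusters.length then clusters.getD k []
      else if k = clusters.length then item else [] := by
  simp only [List.getD]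
  by_cases hk : k < clusters.length
  · rw [List.getElem?_append_left hk]
    simp [hk]
  · by_cases hk2 : k = clusters.length
    · subst hk2
      rw [List.getElem?_append_right (le_refl _)]
      simp
    · rw [List.getElem?_eq_none (by simp; omega)]
      simp [hk, hk2]

theorem pv_contains_iff_ne_nil (clusters : List (List Int)) (a b : Int) (t : String) (S : List Nat)
    (hmem : ∀ j, j ∈ S ↔ ∃ h : j < clusters.length, pvTF a b clusters[j] = t) :
    ((clusters.map (pvTF a b)).contains t = true) ↔ S ≠ [] := by
  rw [pv_contains_iff_exists]
  constructor
  · rintro ⟨c, hc, hct⟩ hS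
    obtain ⟨j, hj, rfl⟩ := List.mem_iff_getElem.1 hc
    have := (hmem j).2 ⟨hj, hct⟩
    simp [hS] at this
  · intro hS
    obtain ⟨j, hj⟩ := List.exists_mem_of_ne_nil S hS
    obtain ⟨h, ht⟩ := (hmem j).1 hj
    exact ⟨clusters[j], List.getElem_mem h, ht⟩

-- invariant preservation for the two mutating branches
theorem pv_inv_modify (clusters : List (List Int)) (w : PySem.Dict Int (PySem.Set Nat))
    (hw : pvInv clusters w) (j : Nat) (v : Int) (hj : j < clusters.length) :
    pvInv (clusters.modify j (fun c => c ++ [v])) (pvWhereAdd w v j) := by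
  intro x k
  rw [pvWhereAdd_mem, List.length_modify, pv_getD_modify_append, hw]
  by_cases hk : k = j
  · subst hk
    rw [if_pos ⟨rfl, hj⟩]
    simp only [List.mem_append, List.mem_singleton]
    tauto
  · rw [if_neg (by tauto)]
    tauto

theorem pv_inv_append (clusters : List (List Int)) (w : PySem.Dict Int (PySem.Set Nat))
    (hw : pvInv clusters w) (item : List Int) :
    pvInv (clusters ++ [item]) (pvAddAll w item clusters.length) := by
  intro x k
  rw [pvAddAll_mem, hw, pv_getD_append]
  simp only [List.length_append, List.length_cons, List.length_nil]
  by_cases hk : k < clusters.length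
  · rw [if_pos hk]
    constructor
    · rintro (⟨_, hx⟩ | ⟨rfl, _⟩)
      · exact ⟨by omega, hx⟩
      · exact absurd hk (lt_irrefl _)
    · rintro ⟨_, hx⟩
      exact Or.inl ⟨hk, hx⟩
  · by_cases hk2 : k = clusters.length
    · subst hk2
      rw [if_neg hk, if_pos rfl]
      constructor
      · rintro (⟨h, _⟩ | ⟨_, hx⟩)
        · exact absurd h hk
        · exact ⟨by omega, hx⟩
      · rintro ⟨_, hx⟩
        exact Or.inr ⟨rfl, hx⟩
    · rw [if_neg hk, if_neg hk2]
      constructor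
      · rintro (⟨h, _⟩ | ⟨h, _⟩)
        · exact absurd h hk
        · exact absurd h hk2
      · rintro ⟨_, hx⟩
        simp at hx

-- the heart: one A-step equals one B-step (first component), and the invariant is preserved
theorem pv_step_eq (clusters : List (List Int)) (w : PySem.Dict Int (PySem.Set Nat))
    (item : List Int) (hw : pvInv clusters w) :
    (pvStep (clusters, w) item).1 = put_item2list clusters item ∧
    pvInv (pvStep (clusters, w) item).1 (pvStep (clusters, w) item).2 := by
  have hmem1 : ∀ j : Nat, j ∈ PySem.Set.diff (w.getD ((PySem.List.pyGet? item 0).getD 0) [])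
        (w.getD ((PySem.List.pyGet? item 1).getD 0) []) ↔
      ∃ h : j < clusters.length,
        pvTF ((PySem.List.pyGet? item 0).getD 0) ((PySem.List.pyGet? item 1).getD 0) clusters[j] = "T1" := by
    intro j
    rw [PySem.Set.mem_diff, hw, hw]
    constructor
    · rintro ⟨⟨hj, hxa⟩, hxb⟩
      refine ⟨hj, (pvTF_eq_T1 _ _ _).2 ⟨?_, ?_⟩⟩
      · rwa [← List.getD_eq_getElem _ [] hj]
      · rw [← List.getD_eq_getElem _ [] hj]
        intro hb; exact hxb ⟨hj, hb⟩
    · rintro ⟨hj, ht⟩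
      obtain ⟨hxa, hxb⟩ := (pvTF_eq_T1 _ _ _).1 ht
      rw [← List.getD_eq_getElem _ [] hj] at hxa hxb
      exact ⟨⟨hj, hxa⟩, fun h => hxb h.2⟩
  have hmem0 : ∀ j : Nat, j ∈ PySem.Set.diff (w.getD ((PySem.List.pyGet? item 1).getD 0) [])
        (w.getD ((PySem.List.pyGet? item 0).getD 0) []) ↔
      ∃ h : j < clusters.length,
        pvTF ((PySem.List.pyGet? item 0).getD 0) ((PySem.List.pyGet? item 1).getD 0) clusters[j] = "T0" := by
    intro j
    rw [PySem.Set.mem_diff, hw, hw]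
    constructor
    · rintro ⟨⟨hj, hxb⟩, hxa⟩
      refine ⟨hj, (pvTF_eq_T0 _ _ _).2 ⟨?_, ?_⟩⟩
      · rw [← List.getD_eq_getElem _ [] hj]
        intro ha; exact hxa ⟨hj, ha⟩
      · rwa [← List.getD_eq_getElem _ [] hj]
    · rintro ⟨hj, ht⟩
      obtain ⟨hxa, hxb⟩ := (pvTF_eq_T0 _ _ _).1 ht
      rw [← List.getD_eq_getElem _ [] hj] at hxa hxb
      exact ⟨⟨hj, hxb⟩, fun h => hxa h.2⟩
  have hmemT : ∀ j : Nat, j ∈ PySem.Set.inter (w.getD ((PySem.List.pyGet? item 0).getD 0) [])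
        (w.getD ((PySem.List.pyGet? item 1).getD 0) []) ↔
      ∃ h : j < clusters.length,
        pvTF ((PySem.List.pyGet? item 0).getD 0) ((PySem.List.pyGet? item 1).getD 0) clusters[j] = "T" := by
    intro j
    rw [PySem.Set.mem_inter, hw, hw]
    constructor
    · rintro ⟨⟨hj, hxa⟩, ⟨_, hxb⟩⟩
      refine ⟨hj, (pvTF_eq_T _ _ _).2 ⟨?_, ?_⟩⟩
      · rwa [← List.getD_eq_getElem _ [] hj]
      · rwa [← List.getD_eq_getElem _ [] hj]
    · rintro ⟨hj, ht⟩
      obtain ⟨hxa, hxb⟩ := (pvTF_eq_T _ _ _).1 ht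
      rw [← List.getD_eq_getElem _ [] hj] at hxa hxb
      exact ⟨⟨hj, hxa⟩, ⟨hj, hxb⟩⟩
  have hc1 := pv_contains_iff_ne_nil clusters _ _ "T1" _ hmem1
  have hc0 := pv_contains_iff_ne_nil clusters _ _ "T0" _ hmem0
  have hcT := pv_contains_iff_ne_nil clusters _ _ "T" _ hmemT
  simp only [pvStep, put_item2list]
  by_cases h1 : PySem.Set.diff (w.getD ((PySem.List.pyGet? item 0).getD 0) [])
      (w.getD ((PySem.List.pyGet? item 1).getD 0) []) = []
  · rw [if_neg (by simpa using h1)]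
    have hco1 : (clusters.map (pvTF ((PySem.List.pyGet? item 0).getD 0) ((PySem.List.pyGet? item 1).getD 0))).contains "T1" = false := by
      rw [Bool.eq_false_iff]; intro h; exact (hc1.1 h) h1
    rw [hco1, if_neg Bool.false_ne_true]
    by_cases h0 : PySem.Set.diff (w.getD ((PySem.List.pyGet? item 1).getD 0) [])
        (w.getD ((PySem.List.pyGet? item 0).getD 0) []) = []
    · rw [if_neg (by simpa using h0)]
      have hco0 : (clusters.map (pvTF ((PySem.List.pyGet? item 0).getD 0) ((PySem.List.pyGet? item 1).getD 0))).contains "T0" = false := by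
        rw [Bool.eq_false_iff]; intro h; exact (hc0.1 h) h0
      rw [hco0, if_neg Bool.false_ne_true]
      by_cases hT : PySem.Set.inter (w.getD ((PySem.List.pyGet? item 0).getD 0) [])
          (w.getD ((PySem.List.pyGet? item 1).getD 0) []) = []
      · rw [if_neg (by simpa using hT)]
        have hcoT : (clusters.map (pvTF ((PySem.List.pyGet? item 0).getD 0) ((PySem.List.pyGet? item 1).getD 0))).contains "T" = false := by
          rw [Bool.eq_false_iff]; intro h; exact (hcT.1 h) hT
        rw [hcoT, if_neg Bool.false_ne_true]
        exact ⟨rfl, pv_inv_append clusters w hw item⟩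
      · rw [if_pos (by simpa using hT)]
        have hcoT : (clusters.map (pvTF ((PySem.List.pyGet? item 0).getD 0) ((PySem.List.pyGet? item 1).getD 0))).contains "T" = true := hcT.2 hT
        rw [hcoT, if_pos rfl]
        exact ⟨rfl, hw⟩
    · rw [if_pos (by simpa using h0)]
      have hco0 : (clusters.map (pvTF ((PySem.List.pyGet? item 0).getD 0) ((PySem.List.pyGet? item 1).getD 0))).contains "T0" = true := hc0.2 h0
      rw [hco0, if_pos rfl]
      have hix := pv_index?_map_eq_min? clusters _ _ "T0" hmem0 h0
      obtain ⟨m, hm⟩ : ∃ m, PySem.List.min? (PySem.Set.diff (w.getD ((PySem.List.pyGet? item 1).getD 0) [])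
          (w.getD ((PySem.List.pyGet? item 0).getD 0) [])) (fun x => x) = some m := by
        cases hmin : PySem.List.min? (PySem.Set.diff (w.getD ((PySem.List.pyGet? item 1).getD 0) [])
            (w.getD ((PySem.List.pyGet? item 0).getD 0) [])) (fun x : Nat => x) with
        | none => exact absurd ((PySem.List.min?_eq_none_iff _ (fun x => x)).1 hmin) h0
        | some m => exact ⟨m, rfl⟩
      have hmlt : m < clusters.length := ((hmem0 m).1 (PySem.List.min?_mem hm)).1
      refine ⟨by rw [hix], ?_⟩
      rw [hm]
      simp only [Option.getD_some]
      exact pv_inv_modify clusters w hw m _ hmlt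
  · rw [if_pos (by simpa using h1)]
    have hco1 : (clusters.map (pvTF ((PySem.List.pyGet? item 0).getD 0) ((PySem.List.pyGet? item 1).getD 0))).contains "T1" = true := hc1.2 h1
    rw [hco1, if_pos rfl]
    have hix := pv_index?_map_eq_min? clusters _ _ "T1" hmem1 h1
    obtain ⟨m, hm⟩ : ∃ m, PySem.List.min? (PySem.Set.diff (w.getD ((PySem.List.pyGet? item 0).getD 0) [])
        (w.getD ((PySem.List.pyGet? item 1).getD 0) [])) (fun x => x) = some m := by
      cases hmin : PySem.List.min? (PySem.Set.diff (w.getD ((PySem.List.pyGet? item 0).getD 0) [])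
          (w.getD ((PySem.List.pyGet? item 1).getD 0) [])) (fun x : Nat => x) with
      | none => exact absurd ((PySem.List.min?_eq_none_iff _ (fun x => x)).1 hmin) h1
      | some m => exact ⟨m, rfl⟩
    have hmlt : m < clusters.length := ((hmem1 m).1 (PySem.List.min?_mem hm)).1
    refine ⟨by rw [hix], ?_⟩
    rw [hm]
    simp only [Option.getD_some]
    exact pv_inv_modify clusters w hw m _ hmlt

theorem pv_foldl_eq (items : List (List Int)) (clusters : List (List Int))
    (w : PySem.Dict Int (PySem.Set Nat)) (hw : pvInv clusters w) :
    (items.foldl pvStep (clusters, w)).1 = items.foldl put_item2list clusters := by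
  induction items generalizing clusters w with
  | nil => rfl
  | cons it its ih =>
    obtain ⟨heq, hinv⟩ := pv_step_eq clusters w it hw
    simp only [List.foldl_cons]
    rw [show pvStep (clusters, w) it = ((pvStep (clusters, w) it).1, (pvStep (clusters, w) it).2) from rfl,
        ih _ _ hinv, heq]

theorem pv_inv_init (first : List Int) : pvInv [first] (pvAddAll PySem.Dict.empty first 0) := by
  intro x j
  rw [pvAddAll_mem]
  simp only [PySem.Dict.getD_empty, List.not_mem_nil, false_or, List.getD]
  constructor
  · rintro ⟨rfl, hx⟩
    exact ⟨Nat.zero_lt_one, by simpa using hx⟩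
  · rintro ⟨hj, hx⟩
    have hj0 : j = 0 := by simp at hj; omega
    subst hj0
    exact ⟨rfl, by simpa using hx⟩

-- ===== VERDICT (by name: the statement is the Claim_ definition above) =====
theorem put_list2cluster_spec : Claim_equal_put_list2cluster := by
  intro repeat_ls _ _
  unfold Spec_put_list2cluster put_list2cluster put_list2cluster_alt
  cases h : repeat_ls.map (fun i => (PySem.List.pyGet? i 0).getD []) with
  | nil => rfl
  | cons first rest =>
    simp only
    rw [pv_foldl_eq rest [first] _ (pv_inv_init first)]
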